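-- pv_equiv track=rewrite | github.com/YanboQiao/ailab | lab4/data.py | get_key_joint_indices
-- ===== SOURCE A (Python) =====
-- from typing import List, Tuple, Dict, Optional
--
-- def get_key_joint_indices(data_dim: int) -> List[int]:
--     """
--     根据数据维度动态生成关键关节索引
--
--     Args:
--         data_dim: 数据特征维度
--
--     Returns:
--         关键关节索引列表
--     """
--     # 基础关键关节模式（每个关节3个坐标：X, Y, Z）
--     base_joints = {
--         # 躯干核心 (前几个关节通常是躯干)
--         'chest': [4, 5, 6],        # 胸部
--         'neck': [7, 8, 9],         # 颈部
--         'head': [10, 11, 12],      # 头部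
--
--         # 上肢关节
--         'l_shoulder': [13, 14, 15], # 左肩
--         'l_elbow': [16, 17, 18],    # 左肘
--         'l_wrist': [19, 20, 21],    # 左腕
--
--         'r_shoulder': [22, 23, 24], # 右肩
--         'r_elbow': [25, 26, 27],    # 右肘
--         'r_wrist': [28, 29, 30],    # 右腕
--
--         # 下肢关节
--         'l_hip': [31, 32, 33],      # 左髋
--         'l_knee': [34, 35, 36],     # 左膝
--         'l_ankle': [37, 38, 39],    # 左踝
--
--         'r_hip': [40, 41, 42],      # 右髋
--         'r_knee': [43, 44, 45],     # 右膝
--         'r_ankle': [46, 47, 48],    # 右踝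
--     }
--
--     # 收集所有在数据维度范围内的索引
--     key_indices = []
--     for joint_name, indices in base_joints.items():
--         for idx in indices:
--             if idx < data_dim:
--                 key_indices.append(idx)
--
--     # 如果没有找到合适的关键关节，使用前面的一些索引
--     if not key_indices:
--         key_indices = list(range(min(24, data_dim)))  # 取前24个特征作为关键特征
--
--     return sorted(key_indices)
-- ===== SOURCE B (Python) =====
-- def get_key_joint_indices(data_dim: int) -> list:
--     # The joint dict's indices are exactly the contiguous integers 4..48, so the
--     # filtered, sorted result is a plain range; the empty-case fallback is range(data_dim).
--     if data_dim <= 4: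
--         return list(range(data_dim))
--     return list(range(4, min(49, data_dim)))
-- ===== Notes on version B (the rewrite author's own statement) =====
-- stated objective: simpler
-- what changed: Replaces the 15-entry joint dictionary and its nested filtering loop plus a final sort with closed-form range arithmetic: range(data_dim) when data_dim <= 4 (the fallback case), else range(4, min(49, data_dim)).
import Mathlib
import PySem

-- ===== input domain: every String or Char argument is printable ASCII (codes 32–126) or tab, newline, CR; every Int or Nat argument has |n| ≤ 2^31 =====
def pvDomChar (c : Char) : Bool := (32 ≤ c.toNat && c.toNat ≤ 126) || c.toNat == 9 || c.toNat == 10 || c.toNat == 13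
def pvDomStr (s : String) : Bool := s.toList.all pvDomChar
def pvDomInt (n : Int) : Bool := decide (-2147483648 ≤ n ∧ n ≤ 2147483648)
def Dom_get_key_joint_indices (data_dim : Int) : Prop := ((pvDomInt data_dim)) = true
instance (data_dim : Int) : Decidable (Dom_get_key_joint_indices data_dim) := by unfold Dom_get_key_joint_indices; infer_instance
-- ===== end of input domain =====

-- B replaces A's joint dictionary, nested filtering loop and final sort with closed-form range arithmetic (objective: simpler).

-- ===== PORT A =====
def pvBaseJoints : List (String × List Int) :=
  [("chest", [4, 5, 6]), ("neck", [7, 8, 9]), ("head", [10, 11, 12]),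
   ("l_shoulder", [13, 14, 15]), ("l_elbow", [16, 17, 18]), ("l_wrist", [19, 20, 21]),
   ("r_shoulder", [22, 23, 24]), ("r_elbow", [25, 26, 27]), ("r_wrist", [28, 29, 30]),
   ("l_hip", [31, 32, 33]), ("l_knee", [34, 35, 36]), ("l_ankle", [37, 38, 39]),
   ("r_hip", [40, 41, 42]), ("r_knee", [43, 44, 45]), ("r_ankle", [46, 47, 48])]

def get_key_joint_indices (data_dim : Int) : List Int :=
  let key_indices : List Int :=
    pvBaseJoints.foldl
      (fun acc kv => kv.2.foldl (fun acc2 idx => if idx < data_dim then acc2 ++ [idx] else acc2) acc)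
      []
  let key_indices := if key_indices = [] then PySem.List.pyRange 0 (min 24 data_dim) 1 else key_indices
  PySem.List.sorted key_indices (fun x => x)

-- ===== PORT B =====
def get_key_joint_indices_alt (data_dim : Int) : List Int :=
  if data_dim ≤ 4 then PySem.List.pyRange 0 data_dim 1
  else PySem.List.pyRange 4 (min 49 data_dim) 1

-- ===== PRECONDITION & SPEC =====
def Spec_get_key_joint_indices (data_dim : Int) (out : List Int) : Prop := out = get_key_joint_indices_alt data_dim
instance (data_dim : Int) (out : List Int) : Decidable (Spec_get_key_joint_indices data_dim out) := by unfold Spec_get_key_joint_indices; infer_instance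

-- ===== CLAIM (what is proved, stated in full; the proofs are below) =====
def Claim_equal_get_key_joint_indices : Prop := ∀ (data_dim : Int), Dom_get_key_joint_indices data_dim → Spec_get_key_joint_indices data_dim (get_key_joint_indices data_dim)

-- ===== LEMMAS AND PROOFS =====

-- the concatenation of all index lists in pvBaseJoints
def pvAllIdx : List Int := pvBaseJoints.flatMap (fun kv => kv.2)

lemma pv_inner_eq (d : Int) (l acc : List Int) :
    l.foldl (fun a i => if i < d then a ++ [i] else a) acc = acc ++ l.filter (fun i => decide (i < d)) := by
  have h := PySem.List.foldl_append_if (fun i => decide (i < d)) id l acc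
  simpa using h

lemma pv_outer_eq (d : Int) (kvs : List (String × List Int)) (acc : List Int) :
    kvs.foldl (fun acc kv => kv.2.foldl (fun a i => if i < d then a ++ [i] else a) acc) acc
      = acc ++ (kvs.flatMap (fun kv => kv.2)).filter (fun i => decide (i < d)) := by
  induction kvs generalizing acc with
  | nil => simp
  | cons kv rest ih =>
      rw [List.foldl_cons, pv_inner_eq, ih]
      simp [List.filter_append]

lemma pv_loop_eq (d : Int) :
    pvBaseJoints.foldl
      (fun acc kv => kv.2.foldl (fun acc2 idx => if idx < d then acc2 ++ [idx] else acc2) acc) []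
      = pvAllIdx.filter (fun i => decide (i < d)) := by
  simpa [pvAllIdx] using pv_outer_eq d pvBaseJoints []

lemma pv_allIdx_bounds : ∀ a ∈ pvAllIdx, 4 ≤ a ∧ a ≤ 48 := by decide

lemma pvRange_zero_nonpos (d : Int) (h : d ≤ 0) : PySem.List.pyRange 0 d 1 = [] := by
  simp [PySem.List.pyRange]
  omega

-- ===== VERDICT (by name: the statement is the Claim_ definition above) =====
theorem get_key_joint_indices_spec : Claim_equal_get_key_joint_indices := by
  intro d _
  show get_key_joint_indices d = get_key_joint_indices_alt d
  unfold get_key_joint_indices get_key_joint_indices_alt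
  simp only [pv_loop_eq]
  by_cases h49 : 49 ≤ d
  · have hfull : pvAllIdx.filter (fun i => decide (i < d)) = pvAllIdx := by
      rw [List.filter_eq_self]
      intro a ha
      have := pv_allIdx_bounds a ha
      simp; omega
    rw [hfull]
    have hne : pvAllIdx ≠ [] := by decide
    have hmin : min (49 : Int) d = 49 := by omega
    rw [if_neg hne, if_neg (by omega : ¬ d ≤ 4), hmin]
    have hsorted : PySem.List.sorted pvAllIdx (fun x => x) = pvAllIdx :=
      PySem.List.sorted_eq_self_of_pairwise _ _ (by decide)
    rw [hsorted]
    decide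
  · by_cases hneg : d ≤ 0
    · have hnil : pvAllIdx.filter (fun i => decide (i < d)) = [] := by
        rw [List.filter_eq_nil_iff]
        intro a ha
        have := pv_allIdx_bounds a ha
        simp; omega
      have hmin : min (24 : Int) d = d := by omega
      rw [hnil, if_pos rfl, hmin, if_pos (by omega : d ≤ 4), pvRange_zero_nonpos d hneg]
      decide
    · have h0 : 0 ≤ d := by omega
      have h48 : d ≤ 48 := by omega
      interval_cases d <;> decide

-- ===== TEMPLATES removed =====
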